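-- pv_equiv track=rewrite | github.com/Janeliao123/MCAC-Job-Sceduling-Problem | experiments/functions_change.py | find_job_level
-- ===== SOURCE A (Python) =====
-- def find_job_level(job_schedule):  # 找出同一層的工作
--     job_schedule_no_main = {}
--     for m, job_list in job_schedule.items():
--         job_schedule_no_main[m] = []
--         for j, t, yr in job_list:
--             if j != 'm':
--                 job_schedule_no_main[m].append(j)
--     jobs_level = {}
--     max_level = max([len(x) for x in job_schedule_no_main.values()])
--     for l in range(max_level):
--         jobs_level[l] = []
--         for m in job_schedule_no_main:
--             if len(job_schedule_no_main[m]) > l: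
--                  jobs_level[l].append(job_schedule_no_main[m][l])
--     return jobs_level, max_level
-- ===== SOURCE B (Python) =====
-- def find_job_level(job_schedule):  # single pass over all jobs instead of level x machine rescans
--     jobs_level = {}
--     max_level = 0
--     for job_list in job_schedule.values():
--         level = 0
--         for j, t, yr in job_list:
--             if j != 'm':
--                 jobs_level.setdefault(level, []).append(j)
--                 level += 1
--         max_level = max(max_level, level)
--     return jobs_level, max_level
-- ===== Notes on version B (the rewrite author's own statement) =====
-- stated objective: faster
-- what changed: B replaces A's two-phase level-by-level rescan of every machine's filtered list (for each level, scan all machines) by a single pass that appends each non-'m' job to its level's list as it is encountered, tracking max_level on the fly.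
-- outside the precondition, e.g. on find_job_level({}): A raises ValueError, B returns ({}, 0)
import Mathlib
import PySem

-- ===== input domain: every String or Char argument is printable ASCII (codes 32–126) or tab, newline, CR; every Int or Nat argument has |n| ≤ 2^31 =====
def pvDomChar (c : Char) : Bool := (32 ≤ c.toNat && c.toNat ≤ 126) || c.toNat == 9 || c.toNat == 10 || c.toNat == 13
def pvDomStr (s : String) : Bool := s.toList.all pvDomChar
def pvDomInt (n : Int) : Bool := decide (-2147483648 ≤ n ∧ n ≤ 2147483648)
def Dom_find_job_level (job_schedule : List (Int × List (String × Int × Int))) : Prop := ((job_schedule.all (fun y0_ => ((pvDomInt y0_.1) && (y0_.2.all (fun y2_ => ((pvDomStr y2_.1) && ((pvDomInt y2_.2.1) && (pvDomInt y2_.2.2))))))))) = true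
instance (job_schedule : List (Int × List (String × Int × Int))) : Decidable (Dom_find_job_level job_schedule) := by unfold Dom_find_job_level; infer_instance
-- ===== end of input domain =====

-- B replaces A's level-by-level rescan of every machine (O(max_level · machines)) by one pass that
-- appends each job to its level's list as it is met (O(total jobs + max_level)).

-- ===== PORT A =====
def find_job_level (job_schedule : List (Int × List (String × Int × Int))) : (List (Int × List String)) × Int :=
  let noMain : PySem.Dict Int (List String) :=
    job_schedule.foldl
      (fun d p =>
        p.2.foldl
          (fun d t => if t.1 ≠ "m" then d.modify p.1 [] (· ++ [t.1]) else d)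
          (d.insert p.1 []))
      PySem.Dict.empty
  match PySem.List.max? (noMain.values.map (fun x => (x.length : Int))) id with
  | none => ([], 0)  -- Python raises ValueError here (max of an empty sequence); excluded by Pre_
  | some maxLevel =>
    let jobsLevel : PySem.Dict Int (List String) :=
      (PySem.List.pyRange 0 maxLevel 1).foldl
        (fun jl l =>
          noMain.keys.foldl
            (fun jl m =>
              if ((noMain.getD m []).length : Int) > l then
                jl.modify l [] (· ++ [(PySem.List.pyGet? (noMain.getD m []) l).getD ""])
              else jl)
            (jl.insert l []))
        PySem.Dict.empty
    (jobsLevel.items, maxLevel)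

-- ===== PORT B =====
def find_job_level_alt (job_schedule : List (Int × List (String × Int × Int))) : (List (Int × List String)) × Int :=
  let r : PySem.Dict Int (List String) × Int :=
    job_schedule.foldl
      (fun acc p =>
        let s :=
          p.2.foldl
            (fun (s : PySem.Dict Int (List String) × Int) t =>
              if t.1 ≠ "m" then (s.1.modify s.2 [] (· ++ [t.1]), s.2 + 1) else s)
            (acc.1, 0)
        (s.1, max acc.2 s.2))
      (PySem.Dict.empty, 0)
  (r.1.items, r.2)

-- ===== PRECONDITION & SPEC =====
-- Pre_ excludes the empty schedule, on which A's max([]) raises ValueError, and association lists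
-- with duplicate machine keys, which cannot arise from a Python dict argument (dict keys are unique).
def Pre_find_job_level (job_schedule : List (Int × List (String × Int × Int))) : Prop :=
  job_schedule ≠ [] ∧ (job_schedule.map Prod.fst).Nodup
instance (job_schedule : List (Int × List (String × Int × Int))) : Decidable (Pre_find_job_level job_schedule) := by unfold Pre_find_job_level; infer_instance
def pvWitness_find_job_level : (List (Int × List (String × Int × Int))) :=
  [(1, [("a", 0, 0), ("m", 1, 2), ("b", 3, 4)]), (2, [("c", 0, 0), ("d", 0, 0)])]

def Spec_find_job_level (job_schedule : List (Int × List (String × Int × Int))) (out : (List (Int × List String)) × Int) : Prop := out = find_job_level_alt job_schedule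
instance (job_schedule : List (Int × List (String × Int × Int))) (out : (List (Int × List String)) × Int) : Decidable (Spec_find_job_level job_schedule out) := by unfold Spec_find_job_level; infer_instance

-- ===== CLAIM (what is proved, stated in full; the proofs are below) =====
def Claim_equal_find_job_level : Prop := ∀ (job_schedule : List (Int × List (String × Int × Int))), Dom_find_job_level job_schedule → Pre_find_job_level job_schedule → Spec_find_job_level job_schedule (find_job_level job_schedule)

-- ===== LEMMAS AND PROOFS =====

-- the filtered (non-'m') job names of one machine's list
def filt (jl : List (String × Int × Int)) : List String :=
  (jl.filter (fun t => t.1 != "m")).map (fun t => t.1)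

-- column l of the transpose
def colI (l : Int) (L : List (List String)) : List String :=
  (L.filter (fun xs => decide ((xs.length : Int) > l))).map (fun xs => (PySem.List.pyGet? xs l).getD "")

def nmax (L : List (List String)) : Nat := L.foldl (fun a xs => max a xs.length) 0

def rows (L : List (List String)) : List (Int × List String) :=
  (List.range (nmax L)).map (fun k : Nat => ((k : Int), colI (k : Int) L))

-- state of B's dict after the current machine has delivered its first k jobs
def rowsP (L : List (List String)) (xs : List String) (k : Nat) : List (Int × List String) :=
  (List.range (max (nmax L) k)).map
    (fun i : Nat => ((i : Int), colI (i : Int) L ++ (if i < k then [xs.getD i ""] else [])))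

lemma le_foldl_maxlen (L : List (List String)) : ∀ a : Nat, a ≤ L.foldl (fun a xs => max a xs.length) a := by
  induction L with
  | nil => intro a; simp
  | cons x L ih => intro a; exact le_trans (le_max_left _ _) (ih _)

lemma mem_le_foldl_maxlen (L : List (List String)) : ∀ (a : Nat) (xs : List String), xs ∈ L → xs.length ≤ L.foldl (fun a xs => max a xs.length) a := by
  induction L with
  | nil => intro a xs h; cases h
  | cons y L ih =>
    intro a xs h
    rcases List.mem_cons.1 h with rfl | h'
    · exact le_trans (le_max_right a xs.length) (le_foldl_maxlen L _)
    · exact ih _ xs h'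

lemma mem_le_nmax (L : List (List String)) (xs : List String) (h : xs ∈ L) : xs.length ≤ nmax L :=
  mem_le_foldl_maxlen L 0 xs h

lemma nmax_append (L : List (List String)) (xs : List String) : nmax (L ++ [xs]) = max (nmax L) xs.length := by
  simp [nmax, List.foldl_append]

lemma colI_of_ge (L : List (List String)) (l : Int) (h : ∀ xs ∈ L, (xs.length : Int) ≤ l) : colI l L = [] := by
  unfold colI
  rw [List.filter_eq_nil_iff.2]
  · rfl
  · intro xs hxs
    simp only [decide_eq_true_eq]
    exact not_lt.2 (h xs hxs)

lemma colI_append (L : List (List String)) (xs : List String) (l : Int) :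
    colI l (L ++ [xs]) = colI l L ++ (if (xs.length : Int) > l then [(PySem.List.pyGet? xs l).getD ""] else []) := by
  by_cases h : (xs.length : Int) > l <;> simp [colI, List.filter_append, h]

lemma max?_foldl_int (f : Option Int → Int → Option Int)
    (hf : ∀ m x, f (some m) x = some (max m x)) :
    ∀ (l : List Int) (m : Int), l.foldl f (some m) = some (l.foldl max m) := by
  intro l
  induction l with
  | nil => intro m; rfl
  | cons x l ih =>
    intro m
    simp only [List.foldl_cons, hf]
    exact ih (max m x)

lemma max?_eq_foldl (l : List Int) (hne : l ≠ []) (hnn : ∀ x ∈ l, 0 ≤ x) :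
    PySem.List.max? l id = some (l.foldl max 0) := by
  cases l with
  | nil => exact absurd rfl hne
  | cons x l =>
    have h0 : (0 : Int) ≤ x := hnn x (List.mem_cons_self ..)
    simp only [PySem.List.max?, List.foldl_cons]
    rw [max?_foldl_int _ (fun m x => by
      by_cases h : m < x <;> simp [h, max_def, id] <;> omega)]
    rw [max_eq_right h0]

lemma castmax (L : List (List String)) : ∀ a : Nat,
    (L.map (fun x => (x.length : Int))).foldl max (a : Int) = ((L.foldl (fun a xs => max a xs.length) a : Nat) : Int) := by
  induction L with
  | nil => intro a; rfl
  | cons x L ih =>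
    intro a
    simp only [List.map_cons, List.foldl_cons]
    rw [← Nat.cast_max, ih]

-- A's inner accumulation loop appends the filtered names
lemma innerA (jl : List (String × Int × Int)) (d : PySem.Dict Int (List String)) (m : Int) (acc : List String) :
    jl.foldl (fun d t => if t.1 ≠ "m" then d.modify m [] (· ++ [t.1]) else d) (d.insert m acc)
      = d.insert m (acc ++ filt jl) := by
  induction jl generalizing acc with
  | nil => simp [filt]
  | cons t jl ih =>
    simp only [List.foldl_cons]
    by_cases h : t.1 = "m"
    · rw [if_neg (by simp [h])]
      have hf : filt (t :: jl) = filt jl := by simp [filt, h]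
      rw [hf]
      exact ih acc
    · rw [if_pos h]
      have hm : (d.insert m acc).modify m [] (· ++ [t.1]) = d.insert m (acc ++ [t.1]) := by
        simp only [PySem.Dict.modify, PySem.Dict.getD_insert_self, PySem.Dict.insert_insert_self]
      rw [hm, ih (acc ++ [t.1])]
      simp [filt, h]

-- A's first loop builds exactly the filtered per-machine association list
lemma noMainA (js : List (Int × List (String × Int × Int))) (hnd : (js.map Prod.fst).Nodup) :
    js.foldl
      (fun d p => p.2.foldl
        (fun d t => if t.1 ≠ "m" then d.modify p.1 [] (· ++ [t.1]) else d)
        (d.insert p.1 []))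
      PySem.Dict.empty
      = PySem.Dict.mk (js.map (fun p => (p.1, filt p.2))) := by
  have hstep : (fun (d : PySem.Dict Int (List String)) (p : Int × List (String × Int × Int)) =>
      p.2.foldl (fun d t => if t.1 ≠ "m" then d.modify p.1 [] (· ++ [t.1]) else d) (d.insert p.1 []))
      = fun d p => d.insert p.1 (filt p.2) := by
    funext d p
    simpa using innerA p.2 d p.1 []
  rw [hstep]
  apply PySem.Dict.ext
  rw [PySem.Dict.items_foldl_insert_fresh js Prod.fst (fun p => filt p.2) PySem.Dict.empty
    (by intro a _; simp [PySem.Dict.contains_empty]) hnd]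
  simp [PySem.Dict.empty]

-- A's per-level machine scan collects column l
lemma colA (L : List (List String)) (jl : PySem.Dict Int (List String)) (l : Int) (acc : List String) :
    L.foldl (fun jl xs =>
        if ((xs.length : Int) > l) then jl.modify l [] (· ++ [(PySem.List.pyGet? xs l).getD ""]) else jl)
      (jl.insert l acc)
      = jl.insert l (acc ++ colI l L) := by
  induction L generalizing acc with
  | nil => simp [colI]
  | cons xs L ih =>
    simp only [List.foldl_cons]
    by_cases h : (xs.length : Int) > l
    · rw [if_pos h]
      have hm : (jl.insert l acc).modify l [] (· ++ [(PySem.List.pyGet? xs l).getD ""])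
          = jl.insert l (acc ++ [(PySem.List.pyGet? xs l).getD ""]) := by
        simp only [PySem.Dict.modify, PySem.Dict.getD_insert_self, PySem.Dict.insert_insert_self]
      rw [hm, ih (acc ++ [(PySem.List.pyGet? xs l).getD ""])]
      simp [colI, h]
    · rw [if_neg h, ih acc]
      simp [colI, h]

-- B's machine loop over the raw triples is the same loop over the filtered names
lemma innerB (raw : List (String × Int × Int)) (s : PySem.Dict Int (List String) × Int) :
    raw.foldl (fun s t => if t.1 ≠ "m" then (s.1.modify s.2 [] (· ++ [t.1]), s.2 + 1) else s) s
      = (filt raw).foldl (fun s j => (s.1.modify s.2 [] (· ++ [j]), s.2 + 1)) s := by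
  induction raw generalizing s with
  | nil => rfl
  | cons t raw ih =>
    simp only [List.foldl_cons]
    by_cases h : t.1 = "m"
    · rw [if_neg (by simp [h])]
      have hf : filt (t :: raw) = filt raw := by simp [filt, h]
      rw [hf]
      exact ih s
    · rw [if_pos h]
      have hf : filt (t :: raw) = t.1 :: filt raw := by simp [filt, h]
      rw [hf, List.foldl_cons]
      exact ih _

lemma nodup_keys_rowsP (L : List (List String)) (xs : List String) (k : Nat) :
    ((PySem.Dict.mk (rowsP L xs k)).keys).Nodup := by
  simp only [PySem.Dict.keys, rowsP, List.map_map]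
  have : ((fun p : Int × List String => p.1) ∘ fun i : Nat =>
      ((i : Int), colI (i : Int) L ++ (if i < k then [xs.getD i ""] else []))) = fun i : Nat => (i : Int) := rfl
  rw [this]
  exact (List.nodup_range).map (fun a b => by exact_mod_cast id)

lemma stepB_take (xs : List String) (L : List (List String)) (k : Nat) (hk : k ≤ xs.length) :
    (xs.take k).foldl (fun s j => (s.1.modify s.2 [] (· ++ [j]), s.2 + 1)) (PySem.Dict.mk (rows L), 0)
      = (PySem.Dict.mk (rowsP L xs k), (k : Int)) := by
  induction k with
  | zero =>
    have h0 : rowsP L xs 0 = rows L := by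
      unfold rows rowsP
      rw [Nat.max_zero]
      apply List.map_congr_left
      intro i hi
      simp
    simp only [List.take_zero, List.foldl_nil, h0, Nat.cast_zero]
  | succ k ih =>
    have hk' : k < xs.length := hk
    rw [List.take_add_one, List.getElem?_eq_getElem hk', Option.toList_some, List.foldl_append,
      ih (le_of_lt hk')]
    simp only [List.foldl_cons, List.foldl_nil, PySem.Dict.modify]
    by_cases hkn : k < nmax L
    · -- key k is already present: overwrite in place
      have hmem : (((k : Int)), colI (k : Int) L) ∈ rowsP L xs k := by
        unfold rowsP
        refine List.mem_map.2 ⟨k, List.mem_range.2 (by omega), ?_⟩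
        simp
      have hget : (PySem.Dict.mk (rowsP L xs k)).getD (k : Int) [] = colI (k : Int) L :=
        PySem.Dict.getD_of_mem_items _ hmem (nodup_keys_rowsP L xs k) []
      have hcont : (PySem.Dict.mk (rowsP L xs k)).contains (k : Int) = true := by
        rw [PySem.Dict.contains_iff_mem_keys]
        simp only [PySem.Dict.keys]
        exact List.mem_map.2 ⟨_, hmem, rfl⟩
      rw [Prod.mk.injEq]
      refine ⟨?_, ?_⟩
      · apply PySem.Dict.ext
        rw [PySem.Dict.items_insert_of_contains _ _ hcont, hget]
        show _ = rowsP L xs (k + 1)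
        unfold rowsP
        have hmx : max (nmax L) k = nmax L := by omega
        have hmx' : max (nmax L) (k + 1) = nmax L := by omega
        rw [hmx, hmx', List.map_map]
        apply List.map_congr_left
        intro i hi
        by_cases hik : i = k
        · subst hik
          simp [List.getD, List.getElem?_eq_getElem hk']
        · have hne' : ¬ ((i : Int) = (k : Int)) := by exact_mod_cast hik
          simp only [Function.comp]
          rw [if_neg (by simpa using hne')]
          by_cases h2 : i < k
          · simp [h2, Nat.lt_succ_of_lt h2]
          · have h3 : ¬ i < k + 1 := by omega
            simp [h2, h3]
      · push_cast; ring
    · -- key k is new: setdefault appends it at the end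
      have hmx : max (nmax L) k = k := by omega
      have hcont : (PySem.Dict.mk (rowsP L xs k)).contains (k : Int) = false := by
        rw [← Bool.not_eq_true, PySem.Dict.contains_iff_mem_keys]
        simp only [PySem.Dict.keys, rowsP, List.map_map]
        intro hmem
        rcases List.mem_map.1 hmem with ⟨i, hi, hEq⟩
        have : (i : Int) = (k : Int) := hEq
        have : i = k := by exact_mod_cast this
        rw [hmx] at hi
        exact absurd (List.mem_range.1 hi) (by omega)
      have hget : (PySem.Dict.mk (rowsP L xs k)).getD (k : Int) [] = [] :=
        PySem.Dict.getD_of_not_contains _ [] hcont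
      rw [Prod.mk.injEq]
      refine ⟨?_, ?_⟩
      · apply PySem.Dict.ext
        rw [PySem.Dict.items_insert_of_not_contains _ _ hcont, hget]
        show _ = rowsP L xs (k + 1)
        unfold rowsP
        have hmx' : max (nmax L) (k + 1) = k + 1 := by omega
        rw [hmx, hmx', List.range_succ, List.map_append]
        congr 1
        · apply List.map_congr_left
          intro i hi
          have hik : i < k := List.mem_range.1 hi
          have h1 : i < k + 1 := by omega
          simp [hik, h1]
        · have hcol : colI (k : Int) L = [] := by
            apply colI_of_ge
            intro ys hys
            exact_mod_cast le_trans (mem_le_nmax L ys hys) (by omega)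
          simp [hcol, List.getD, List.getElem?_eq_getElem hk']
      · push_cast; ring

lemma rowsP_full (L : List (List String)) (xs : List String) :
    rowsP L xs xs.length = rows (L ++ [xs]) := by
  unfold rowsP rows
  rw [nmax_append]
  apply List.map_congr_left
  intro i hi
  rw [colI_append]
  by_cases h : i < xs.length
  · have h' : ((xs.length : Int) > (i : Int)) := by exact_mod_cast h
    rw [if_pos h, if_pos h']
    simp [PySem.List.pyGet?_natCast, List.getD]
  · have h' : ¬ ((xs.length : Int) > (i : Int)) := by exact_mod_cast h
    rw [if_neg h, if_neg h']

lemma outerB (js : List (Int × List (String × Int × Int))) : ∀ L : List (List String),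
    js.foldl
      (fun acc p =>
        let s :=
          p.2.foldl
            (fun (s : PySem.Dict Int (List String) × Int) t =>
              if t.1 ≠ "m" then (s.1.modify s.2 [] (· ++ [t.1]), s.2 + 1) else s)
            (acc.1, 0)
        (s.1, max acc.2 s.2))
      (PySem.Dict.mk (rows L), ((nmax L : Nat) : Int))
      = (PySem.Dict.mk (rows (L ++ js.map (fun p => filt p.2))), ((nmax (L ++ js.map (fun p => filt p.2)) : Nat) : Int)) := by
  induction js with
  | nil => intro L; simp
  | cons p js ih =>
    intro L
    simp only [List.foldl_cons]
    rw [innerB]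
    have hfold := stepB_take (filt p.2) L (filt p.2).length (le_refl _)
    rw [List.take_length] at hfold
    rw [hfold, rowsP_full]
    have hmax : max ((nmax L : Nat) : Int) ((filt p.2).length : Int)
        = ((nmax (L ++ [filt p.2]) : Nat) : Int) := by
      rw [nmax_append]; push_cast; rfl
    simp only [hmax]
    have := ih (L ++ [filt p.2])
    simpa using this

-- A's level loop restated over the values (via keys + getD)
lemma keysLoopA (js : List (Int × List (String × Int × Int))) (hnd : (js.map Prod.fst).Nodup)
    (jl : PySem.Dict Int (List String)) (l : Int) :
    (PySem.Dict.mk (js.map (fun p => (p.1, filt p.2)))).keys.foldl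
      (fun jl m =>
        if (((PySem.Dict.mk (js.map (fun p => (p.1, filt p.2)))).getD m []).length : Int) > l then
          jl.modify l [] (· ++ [(PySem.List.pyGet? ((PySem.Dict.mk (js.map (fun p => (p.1, filt p.2)))).getD m []) l).getD ""])
        else jl)
      (jl.insert l [])
      = jl.insert l (colI l (js.map (fun p => filt p.2))) := by
  set d := PySem.Dict.mk (js.map (fun p => (p.1, filt p.2))) with hd
  have hndk : d.keys.Nodup := by
    simpa [hd, PySem.Dict.keys, List.map_map, Function.comp] using hnd
  have hvals : d.values = d.keys.map (fun k => d.getD k []) := PySem.Dict.values_eq_map_keys d hndk []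
  have hfold : d.keys.foldl
      (fun jl m =>
        if ((d.getD m []).length : Int) > l then
          jl.modify l [] (· ++ [(PySem.List.pyGet? (d.getD m []) l).getD ""])
        else jl)
      (jl.insert l [])
      = (d.keys.map (fun k => d.getD k [])).foldl
          (fun jl xs =>
            if ((xs.length : Int) > l) then jl.modify l [] (· ++ [(PySem.List.pyGet? xs l).getD ""]) else jl)
          (jl.insert l []) := by
    rw [List.foldl_map]
  rw [hfold, ← hvals]
  have hv : d.values = js.map (fun p => filt p.2) := by
    simp [hd, PySem.Dict.values, List.map_map, Function.comp]
  rw [hv]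
  simpa using colA (js.map (fun p => filt p.2)) jl l []

-- ===== VERDICT (by name: the statement is the Claim_ definition above) =====
theorem find_job_level_spec : Claim_equal_find_job_level := by
  intro js _ hpre
  obtain ⟨hne, hnd⟩ := hpre
  unfold Spec_find_job_level find_job_level find_job_level_alt
  -- B's loop
  have hB := outerB js []
  rw [show PySem.Dict.mk (rows []) = (PySem.Dict.empty : PySem.Dict Int (List String)) by
        simp [rows, nmax, PySem.Dict.empty],
      show ((nmax ([] : List (List String)) : Nat) : Int) = 0 by simp [nmax]] at hB
  simp only [List.nil_append] at hB
  -- A's first loop and the max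
  have hv : (PySem.Dict.mk (js.map (fun p => (p.1, filt p.2)))).values
      = js.map (fun p => filt p.2) := by
    simp [PySem.Dict.values, List.map_map, Function.comp]
  have hLne : (js.map (fun p => filt p.2)).map (fun x => (x.length : Int)) ≠ [] := by
    simp; exact hne
  have hnn : ∀ x ∈ (js.map (fun p => filt p.2)).map (fun x => (x.length : Int)), (0 : Int) ≤ x := by
    intro x hx
    rcases List.mem_map.1 hx with ⟨ys, _, rfl⟩
    exact Int.natCast_nonneg _
  have hmax : PySem.List.max?
      (((PySem.Dict.mk (js.map (fun p => (p.1, filt p.2)))).values).map (fun x => (x.length : Int))) id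
      = some ((nmax (js.map (fun p => filt p.2)) : Nat) : Int) := by
    rw [hv, max?_eq_foldl _ hLne hnn]
    congr 1
    simpa [nmax] using castmax (js.map (fun p => filt p.2)) 0
  simp only [noMainA js hnd, hmax]
  -- A's level loop
  simp only [keysLoopA js hnd]
  rw [PySem.List.pyRange_zero_nat, List.foldl_map]
  have hitems : ((List.range (nmax (js.map (fun p => filt p.2)))).foldl
      (fun (jl : PySem.Dict Int (List String)) (k : Nat) =>
        jl.insert (k : Int) (colI (k : Int) (js.map (fun p => filt p.2))))
      PySem.Dict.empty).items = rows (js.map (fun p => filt p.2)) := by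
    rw [PySem.Dict.items_foldl_insert_fresh (List.range (nmax (js.map (fun p => filt p.2))))
      (fun k : Nat => (k : Int))
      (fun k : Nat => colI (k : Int) (js.map (fun p => filt p.2))) PySem.Dict.empty
      (by intro a _; simp [PySem.Dict.contains_empty])
      ((List.nodup_range).map (fun a b => by exact_mod_cast id))]
    simp [PySem.Dict.empty, rows]
  rw [hitems]
  -- B's loop, assembled
  simp only [hB]
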